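-- pv_equiv track=rewrite | github.com/DevGetaichatbots/nova-ai-backend-bridge | src/agent.py | _get_row_key
-- ===== SOURCE A (Python) =====
-- def _get_row_key(row: dict, match_key: str) -> str:
--     if match_key == 'tbs':
--         return row.get('TBS', row.get('tbs', '')).strip()
--     elif match_key == 'id':
--         return row.get('Id', row.get('id', row.get('#', ''))).strip()
--     elif match_key == 'entydigt_id':
--         return row.get('Entydigt id', row.get('entydigt id', '')).strip()
--     elif match_key == 'plandisc':
--         task_name = row.get('name', '').strip()
--         location = row.get('location_path', '').strip()
--         parts = [p.strip() for p in location.split('/') if p.strip()]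
--         area = parts[2] if len(parts) >= 3 else (parts[-1] if parts else '')
--         return f"{task_name}|{area}"
--     else:
--         return row.get('Navn', row.get('Opgavenavn', row.get('name', row.get('navn', '')))).strip()
-- ===== SOURCE B (Python) =====
-- def _pick(row: dict, cands: tuple) -> str:
--     # single pass over the row items, keeping the value of the highest-priority
--     # candidate key seen so far (smaller index in cands = higher priority)
--     best_i, best_v = len(cands), ''
--     for k, v in row.items():
--         if k in cands:
--             i = cands.index(k)
--             if i < best_i:
--                 best_i, best_v = i, v
--     return best_v.strip()
--
--
-- def _get_row_key(row: dict, match_key: str) -> str: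
--     if match_key == 'plandisc':
--         task_name = _pick(row, ('name',))
--         location = _pick(row, ('location_path',))
--         parts = [p.strip() for p in location.split('/') if p.strip()]
--         area = (parts[2:3] or parts[-1:] or [''])[0]
--         return f"{task_name}|{area}"
--     if match_key == 'tbs':
--         return _pick(row, ('TBS', 'tbs'))
--     if match_key == 'id':
--         return _pick(row, ('Id', 'id', '#'))
--     if match_key == 'entydigt_id':
--         return _pick(row, ('Entydigt id', 'entydigt id'))
--     return _pick(row, ('Navn', 'Opgavenavn', 'name', 'navn'))
-- ===== Notes on version B (the rewrite author's own statement) =====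
-- stated objective: alternative
-- what changed: Instead of nested row.get fallback chains per key type, B makes a single pass over the row's items with a priority accumulator (keeping the value of the best-ranked candidate key seen), and the plandisc area is selected by slicing (parts[2:3] or parts[-1:] or [''])[0] instead of nested conditionals.
import Mathlib
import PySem

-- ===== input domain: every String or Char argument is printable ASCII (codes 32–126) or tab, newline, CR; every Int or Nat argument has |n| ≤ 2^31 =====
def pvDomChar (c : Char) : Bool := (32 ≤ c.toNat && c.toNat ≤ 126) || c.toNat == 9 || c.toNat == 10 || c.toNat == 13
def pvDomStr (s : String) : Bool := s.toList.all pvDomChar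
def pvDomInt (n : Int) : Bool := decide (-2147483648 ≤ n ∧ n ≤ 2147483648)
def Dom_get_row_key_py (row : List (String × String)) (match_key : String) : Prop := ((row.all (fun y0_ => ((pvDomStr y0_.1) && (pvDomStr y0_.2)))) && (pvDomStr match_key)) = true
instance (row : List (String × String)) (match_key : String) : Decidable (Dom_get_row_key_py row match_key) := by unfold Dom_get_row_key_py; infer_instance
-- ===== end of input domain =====

-- B replaces A's nested row.get fallback chains by a single pass over the row's items with
-- a best-candidate-priority accumulator, and picks the plandisc area by list slicing
-- (objective: alternative; return value only, no mutation).

-- ===== PORT A =====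
def get_row_key_py (row : List (String × String)) (match_key : String) : String :=
  let d := PySem.Dict.mk row
  if match_key = "tbs" then
    PySem.Str.strip (d.getD "TBS" (d.getD "tbs" ""))
  else if match_key = "id" then
    PySem.Str.strip (d.getD "Id" (d.getD "id" (d.getD "#" "")))
  else if match_key = "entydigt_id" then
    PySem.Str.strip (d.getD "Entydigt id" (d.getD "entydigt id" ""))
  else if match_key = "plandisc" then
    let task_name := PySem.Str.strip (d.getD "name" "")
    let location := PySem.Str.strip (d.getD "location_path" "")
    -- location.split('/') never raises (separator is nonempty), so getD [] is exact
    let parts := (((PySem.Str.split? location "/").getD []).filter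
        (fun p => PySem.Str.strip p != "")).map PySem.Str.strip
    let area := if 3 ≤ parts.length then PySem.List.pyGetD parts 2 ""
                else if parts ≠ [] then PySem.List.pyGetD parts (-1) "" else ""
    task_name ++ "|" ++ area
  else
    PySem.Str.strip (d.getD "Navn" (d.getD "Opgavenavn" (d.getD "name" (d.getD "navn" ""))))

-- ===== PORT B =====
-- loop body of _pick: 'if k in cands: i = cands.index(k); if i < best_i: best_i, best_v = i, v'
def pvStep (cands : List String) (b : Nat × String) (kv : String × String) : Nat × String :=
  match PySem.List.index? cands kv.1 with
  | some i => if i < b.1 then (i, kv.2) else b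
  | none => b

-- _pick: one forward pass over row.items(), accumulator (best_i, best_v) = (len(cands), '')
def pvPick (row : List (String × String)) (cands : List String) : String :=
  PySem.Str.strip (row.foldl (pvStep cands) (cands.length, "")).2

def get_row_key_py_alt (row : List (String × String)) (match_key : String) : String :=
  if match_key = "plandisc" then
    let task_name := pvPick row ["name"]
    let location := pvPick row ["location_path"]
    let parts := (((PySem.Str.split? location "/").getD []).filter
        (fun p => PySem.Str.strip p != "")).map PySem.Str.strip
    -- (parts[2:3] or parts[-1:] or [''])[0]
    let sel := if PySem.List.slice parts (some 2) (some 3) ≠ [] then PySem.List.slice parts (some 2) (some 3)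
               else if PySem.List.slice parts (some (-1)) none ≠ [] then PySem.List.slice parts (some (-1)) none
               else [""]
    let area := PySem.List.pyGetD sel 0 ""
    task_name ++ "|" ++ area
  else if match_key = "tbs" then pvPick row ["TBS", "tbs"]
  else if match_key = "id" then pvPick row ["Id", "id", "#"]
  else if match_key = "entydigt_id" then pvPick row ["Entydigt id", "entydigt id"]
  else pvPick row ["Navn", "Opgavenavn", "name", "navn"]

-- ===== PRECONDITION & SPEC =====
def Spec_get_row_key_py (row : List (String × String)) (match_key : String) (out : String) : Prop := out = get_row_key_py_alt row match_key
instance (row : List (String × String)) (match_key : String) (out : String) : Decidable (Spec_get_row_key_py row match_key out) := by unfold Spec_get_row_key_py; infer_instance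

-- ===== CLAIM (what is proved, stated in full; the proofs are below) =====
def Claim_equal_get_row_key_py : Prop := ∀ (row : List (String × String)) (match_key : String), Dom_get_row_key_py row match_key → Spec_get_row_key_py row match_key (get_row_key_py row match_key)

-- ===== LEMMAS AND PROOFS =====

-- A's nested getD chain over a candidate list, as a fold (proof-side characterisation)
def pvChain (cands : List String) (row : List (String × String)) : String :=
  cands.foldr (fun k acc => (PySem.Dict.mk row).getD k acc) ""

-- left-biased minimum on (priority, value) pairs
def pvMerge (a b : Nat × String) : Nat × String := if b.1 < a.1 then b else a

-- B's accumulator state after scanning a row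
def pvT (cands : List String) (row : List (String × String)) : Nat × String :=
  row.foldl (pvStep cands) (cands.length, "")

lemma pvStep_none {cands : List String} {kv : String × String}
    (h : PySem.List.index? cands kv.1 = none) (b : Nat × String) :
    pvStep cands b kv = b := by
  unfold pvStep; rw [h]

lemma pvStep_some {cands : List String} {kv : String × String} {i : Nat}
    (h : PySem.List.index? cands kv.1 = some i) (b : Nat × String) :
    pvStep cands b kv = if i < b.1 then (i, kv.2) else b := by
  unfold pvStep; rw [h]

lemma pvIndex_lt {cands : List String} {x : String} {i : Nat}
    (h : PySem.List.index? cands x = some i) : i < cands.length := by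
  obtain ⟨hk, _, _⟩ := PySem.List.getElem_of_index?_eq_some h
  exact hk

lemma pvStep_fst_le {cands : List String} {b : Nat × String} (kv : String × String)
    (hb : b.1 ≤ cands.length) : (pvStep cands b kv).1 ≤ cands.length := by
  cases hidx : PySem.List.index? cands kv.1 with
  | none => rw [pvStep_none hidx]; exact hb
  | some i =>
      have hi := pvIndex_lt hidx
      rw [pvStep_some hidx]
      split_ifs <;> simp <;> omega

lemma pvMerge_assoc (a b c : Nat × String) :
    pvMerge (pvMerge a b) c = pvMerge a (pvMerge b c) := by
  unfold pvMerge; split_ifs <;> first | rfl | omega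

lemma pvStep_eq_merge (cands : List String) (b : Nat × String) (kv : String × String)
    (hb : b.1 ≤ cands.length) :
    pvStep cands b kv = pvMerge b (pvStep cands (cands.length, "") kv) := by
  cases hidx : PySem.List.index? cands kv.1 with
  | none =>
      rw [pvStep_none hidx, pvStep_none hidx]
      unfold pvMerge
      split_ifs with h
      · simp at h; omega
      · rfl
  | some i =>
      have hi := pvIndex_lt hidx
      rw [pvStep_some hidx, pvStep_some hidx, if_pos hi]
      rfl

lemma pvFold_inv (cands : List String) (row : List (String × String)) :
    ∀ (b : Nat × String), b.1 ≤ cands.length → (b.1 = cands.length → b.2 = "") →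
      (row.foldl (pvStep cands) b).1 ≤ cands.length ∧
      ((row.foldl (pvStep cands) b).1 = cands.length → (row.foldl (pvStep cands) b).2 = "") := by
  induction row with
  | nil => intro b h1 h2; exact ⟨h1, h2⟩
  | cons kv rest ih =>
      intro b h1 h2
      simp only [List.foldl_cons]
      cases hidx : PySem.List.index? cands kv.1 with
      | none => rw [pvStep_none hidx]; exact ih b h1 h2
      | some i =>
          have hi := pvIndex_lt hidx
          rw [pvStep_some hidx]
          by_cases hlt : i < b.1
          · rw [if_pos hlt]; exact ih _ (le_of_lt hi) (by intro h; exfalso; omega)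
          · rw [if_neg hlt]; exact ih b h1 h2

lemma pvT_inv (cands : List String) (row : List (String × String)) :
    (pvT cands row).1 ≤ cands.length ∧
    ((pvT cands row).1 = cands.length → (pvT cands row).2 = "") :=
  pvFold_inv cands row _ le_rfl (fun _ => rfl)

lemma pvMerge_sentinel (cands : List String) (row : List (String × String)) :
    pvMerge (cands.length, "") (pvT cands row) = pvT cands row := by
  obtain ⟨h1, h2⟩ := pvT_inv cands row
  unfold pvMerge
  by_cases h : (pvT cands row).1 < cands.length
  · rw [if_pos h]
  · rw [if_neg h]
    have he : (pvT cands row).1 = cands.length := by omega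
    have h2' := h2 he
    ext
    · simp [he]
    · simp [h2']

lemma pvFoldl_merge (cands : List String) (row : List (String × String)) :
    ∀ (b : Nat × String), b.1 ≤ cands.length →
      row.foldl (pvStep cands) b = pvMerge b (pvT cands row) := by
  induction row with
  | nil =>
      intro b hb; unfold pvT pvMerge
      simp only [List.foldl_nil]
      split_ifs with h
      · simp at h; omega
      · rfl
  | cons kv rest ih =>
      intro b hb
      have hT : pvT cands (kv :: rest) = pvMerge (pvStep cands (cands.length, "") kv) (pvT cands rest) := by
        unfold pvT; simp only [List.foldl_cons]
        exact ih _ (pvStep_fst_le kv le_rfl)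
      rw [List.foldl_cons, ih (pvStep cands b kv) (pvStep_fst_le kv hb), hT,
          pvStep_eq_merge cands b kv hb, pvMerge_assoc]

lemma pvT_cons (cands : List String) (kv : String × String) (rest : List (String × String)) :
    pvT cands (kv :: rest) = pvMerge (pvStep cands (cands.length, "") kv) (pvT cands rest) := by
  unfold pvT; simp only [List.foldl_cons]
  exact pvFoldl_merge cands rest _ (pvStep_fst_le kv le_rfl)

lemma pvT_min (cands : List String) (row : List (String × String)) :
    ∀ kv ∈ row, ∀ i, PySem.List.index? cands kv.1 = some i → (pvT cands row).1 ≤ i := by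
  induction row with
  | nil => intro kv h; exact absurd h List.not_mem_nil
  | cons kv' rest ih =>
      intro kv hmem i hidx
      rw [pvT_cons]
      rcases List.mem_cons.mp hmem with h | h
      · subst h
        have hi := pvIndex_lt hidx
        rw [pvStep_some hidx, if_pos hi]
        unfold pvMerge; split_ifs <;> simp <;> omega
      · have hle := ih kv h i hidx
        unfold pvMerge; split_ifs with hc
        · exact hle
        · cases hidx2 : PySem.List.index? cands kv'.1 with
          | none => rw [pvStep_none hidx2] at hc ⊢; simp at hc ⊢; omega
          | some j =>
              have hj := pvIndex_lt hidx2
              rw [pvStep_some hidx2, if_pos hj] at hc ⊢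
              simp at hc ⊢; omega

lemma pvT_attain (cands : List String) (row : List (String × String)) :
    (pvT cands row).1 < cands.length →
    ∃ kv ∈ row, PySem.List.index? cands kv.1 = some (pvT cands row).1 := by
  induction row with
  | nil => intro h; exact absurd h (by unfold pvT; simp)
  | cons kv rest ih =>
      intro h
      rw [pvT_cons] at h ⊢
      cases hidx : PySem.List.index? cands kv.1 with
      | none =>
          rw [pvStep_none hidx, pvMerge_sentinel] at h ⊢
          obtain ⟨kv', hm, hi⟩ := ih h
          exact ⟨kv', List.mem_cons_of_mem _ hm, hi⟩
      | some i =>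
          have hi := pvIndex_lt hidx
          rw [pvStep_some hidx, if_pos hi] at h ⊢
          unfold pvMerge at h ⊢
          by_cases hl : (pvT cands rest).1 < i
          · rw [if_pos hl] at h ⊢
            obtain ⟨kv', hm, hidx'⟩ := ih h
            exact ⟨kv', List.mem_cons_of_mem _ hm, hidx'⟩
          · rw [if_neg hl] at h ⊢
            exact ⟨kv, List.mem_cons_self, hidx⟩

lemma pvGetMk_mem (rest : List (String × String)) (kv : String × String) (h : kv ∈ rest) :
    ∃ v, (PySem.Dict.mk rest).get? kv.1 = some v := by
  induction rest with
  | nil => exact absurd h List.not_mem_nil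
  | cons kv' rest' ih =>
      rw [show kv' = (kv'.1, kv'.2) from rfl, PySem.Dict.get?_mk_cons]
      by_cases he : kv'.1 = kv.1
      · exact ⟨kv'.2, by simp [he]⟩
      · rcases List.mem_cons.mp h with h' | h'
        · exact absurd (congrArg Prod.fst h'.symm) he
        · simpa [he] using ih h'

lemma pvGetMk_some (rest : List (String × String)) (c : String) (v : String)
    (h : (PySem.Dict.mk rest).get? c = some v) : ∃ kv ∈ rest, kv.1 = c := by
  induction rest with
  | nil => simp [PySem.Dict.get?] at h
  | cons kv' rest' ih =>
      rw [show kv' = (kv'.1, kv'.2) from rfl, PySem.Dict.get?_mk_cons] at h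
      by_cases he : kv'.1 = c
      · exact ⟨kv', List.mem_cons_self, he⟩
      · simp only [beq_iff_eq, if_neg he] at h
        obtain ⟨kv, hm, hc⟩ := ih h
        exact ⟨kv, List.mem_cons_of_mem _ hm, hc⟩

lemma pvChain_nil (cands : List String) : pvChain cands [] = "" := by
  induction cands with
  | nil => rfl
  | cons c cs ih =>
      show (PySem.Dict.mk ([] : List (String × String))).getD c (pvChain cs []) = ""
      rw [ih]
      simp [PySem.Dict.getD, PySem.Dict.get?]

lemma pvChain_cons_not_mem (cands : List String) (kv : String × String)
    (rest : List (String × String)) (h : kv.1 ∉ cands) :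
    pvChain cands (kv :: rest) = pvChain cands rest := by
  induction cands with
  | nil => rfl
  | cons c cs ih =>
      have hne : kv.1 ≠ c := fun he => h (he ▸ List.mem_cons_self)
      have h' : kv.1 ∉ cs := fun hm => h (List.mem_cons_of_mem _ hm)
      show (PySem.Dict.mk (kv :: rest)).getD c (pvChain cs (kv :: rest))
         = (PySem.Dict.mk rest).getD c (pvChain cs rest)
      rw [ih h', PySem.Dict.getD_eq_get?_getD, PySem.Dict.getD_eq_get?_getD,
          show (kv :: rest) = ((kv.1, kv.2) :: rest) from rfl, PySem.Dict.get?_mk_cons]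
      simp [hne]

lemma pvChain_cons_skip (cands : List String) (kv : String × String)
    (rest : List (String × String)) :
    ∀ i, PySem.List.index? cands kv.1 = some i →
    (∃ kv' ∈ rest, ∃ j, PySem.List.index? cands kv'.1 = some j ∧ j < i) →
    pvChain cands (kv :: rest) = pvChain cands rest := by
  induction cands with
  | nil =>
      intro i h _
      rw [PySem.List.index?_eq_idxOf?] at h; simp at h
  | cons c cs ih =>
      rintro i hidx ⟨kv', hm, j, hjidx, hji⟩
      by_cases hc : c = kv.1
      · subst hc
        rw [PySem.List.index?_cons_self] at hidx
        injection hidx with hi0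
        omega
      · rw [PySem.List.index?_cons_of_ne cs hc] at hidx
        cases hi' : PySem.List.index? cs kv.1 with
        | none => rw [hi'] at hidx; simp at hidx
        | some i' =>
            rw [hi'] at hidx
            simp only [Option.map_some] at hidx
            injection hidx with hii
            show (PySem.Dict.mk (kv :: rest)).getD c (pvChain cs (kv :: rest))
               = (PySem.Dict.mk rest).getD c (pvChain cs rest)
            have hne2 : (kv.1 == c) = false := by
              simp only [beq_eq_false_iff_ne, ne_eq]
              exact fun he => hc he.symm
            have hget : (PySem.Dict.mk (kv :: rest)).get? c = (PySem.Dict.mk rest).get? c := by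
              rw [show (kv :: rest) = ((kv.1, kv.2) :: rest) from rfl, PySem.Dict.get?_mk_cons, hne2]
              simp
            cases hv : (PySem.Dict.mk rest).get? c with
            | some v =>
                rw [PySem.Dict.getD_eq_get?_getD, PySem.Dict.getD_eq_get?_getD, hget, hv]
                rfl
            | none =>
                rw [PySem.Dict.getD_eq_get?_getD, PySem.Dict.getD_eq_get?_getD, hget, hv]
                simp only [Option.getD_none]
                have hkc : kv'.1 ≠ c := by
                  intro he
                  obtain ⟨w, hw⟩ := pvGetMk_mem rest kv' hm
                  rw [he, hv] at hw
                  cases hw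
                rw [PySem.List.index?_cons_of_ne cs (fun he => hkc he.symm)] at hjidx
                cases hj' : PySem.List.index? cs kv'.1 with
                | none => rw [hj'] at hjidx; simp at hjidx
                | some j' =>
                    rw [hj'] at hjidx
                    simp only [Option.map_some] at hjidx
                    injection hjidx with hjj
                    exact ih i' hi' ⟨kv', hm, j', hj', by omega⟩

lemma pvChain_cons_hit (cands : List String) (kv : String × String)
    (rest : List (String × String)) :
    ∀ i, PySem.List.index? cands kv.1 = some i →
    (∀ kv' ∈ rest, ∀ j, PySem.List.index? cands kv'.1 = some j → i ≤ j) →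
    pvChain cands (kv :: rest) = kv.2 := by
  induction cands with
  | nil =>
      intro i h _
      rw [PySem.List.index?_eq_idxOf?] at h; simp at h
  | cons c cs ih =>
      intro i hidx hall
      by_cases hc : c = kv.1
      · subst hc
        show (PySem.Dict.mk (kv :: rest)).getD kv.1 (pvChain cs (kv :: rest)) = kv.2
        rw [PySem.Dict.getD_eq_get?_getD,
            show (kv :: rest) = ((kv.1, kv.2) :: rest) from rfl, PySem.Dict.get?_mk_cons]
        simp
      · rw [PySem.List.index?_cons_of_ne cs hc] at hidx
        cases hi' : PySem.List.index? cs kv.1 with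
        | none => rw [hi'] at hidx; simp at hidx
        | some i' =>
            rw [hi'] at hidx
            simp only [Option.map_some] at hidx
            injection hidx with hii
            have hnone : (PySem.Dict.mk rest).get? c = none := by
              cases hv : (PySem.Dict.mk rest).get? c with
              | none => rfl
              | some v =>
                  obtain ⟨kv', hm, hk⟩ := pvGetMk_some rest c v hv
                  have h0 : PySem.List.index? (c :: cs) kv'.1 = some 0 := by
                    rw [hk, PySem.List.index?_cons_self]
                  have := hall kv' hm 0 h0
                  omega
            show (PySem.Dict.mk (kv :: rest)).getD c (pvChain cs (kv :: rest)) = kv.2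
            rw [PySem.Dict.getD_eq_get?_getD,
                show (kv :: rest) = ((kv.1, kv.2) :: rest) from rfl, PySem.Dict.get?_mk_cons]
            have hne : (kv.1 == c) = false := by
              simp only [beq_eq_false_iff_ne, ne_eq]
              exact fun he => hc he.symm
            rw [hne]
            simp only [Bool.false_eq_true, if_false, hnone, Option.getD_none]
            apply ih i' hi'
            intro kv' hm j' hj'
            have hkc : kv'.1 ≠ c := by
              intro he
              obtain ⟨w, hw⟩ := pvGetMk_mem rest kv' hm
              rw [he, hnone] at hw
              cases hw
            have : PySem.List.index? (c :: cs) kv'.1 = some (j' + 1) := by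
              rw [PySem.List.index?_cons_of_ne cs (fun he => hkc he.symm), hj']
              rfl
            have := hall kv' hm (j' + 1) this
            omega

lemma pvT_eq_chain (cands : List String) (row : List (String × String)) :
    (pvT cands row).2 = pvChain cands row := by
  induction row with
  | nil => exact (pvChain_nil cands).symm
  | cons kv rest ih =>
      rw [pvT_cons]
      cases hidx : PySem.List.index? cands kv.1 with
      | none =>
          rw [pvStep_none hidx, pvMerge_sentinel,
              pvChain_cons_not_mem cands kv rest ((PySem.List.index?_eq_none_iff cands kv.1).mp hidx)]
          exact ih
      | some i =>
          have hi := pvIndex_lt hidx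
          rw [pvStep_some hidx, if_pos hi]
          unfold pvMerge
          by_cases hl : (pvT cands rest).1 < i
          · rw [if_pos hl]
            obtain ⟨kv', hm, hidx'⟩ := pvT_attain cands rest (hl.trans hi)
            rw [pvChain_cons_skip cands kv rest i hidx ⟨kv', hm, (pvT cands rest).1, hidx', hl⟩]
            exact ih
          · rw [if_neg hl]
            rw [pvChain_cons_hit cands kv rest i hidx
                (fun kv' hm j hj => le_trans (by omega) (pvT_min cands rest kv' hm j hj))]

lemma pvPick_eq_chain (cands : List String) (row : List (String × String)) :
    pvPick row cands = PySem.Str.strip (pvChain cands row) := by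
  show PySem.Str.strip (pvT cands row).2 = PySem.Str.strip (pvChain cands row)
  rw [pvT_eq_chain]

lemma pvChain_singleton (k : String) (row : List (String × String)) :
    pvChain [k] row = (PySem.Dict.mk row).getD k "" := rfl

lemma pvArea_eq (parts : List String) :
    (if 3 ≤ parts.length then PySem.List.pyGetD parts 2 ""
     else if parts ≠ [] then PySem.List.pyGetD parts (-1) "" else "") =
    PySem.List.pyGetD
      (if PySem.List.slice parts (some 2) (some 3) ≠ [] then PySem.List.slice parts (some 2) (some 3)
       else if PySem.List.slice parts (some (-1)) none ≠ [] then PySem.List.slice parts (some (-1)) none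
       else [""]) 0 "" := by
  have hs1 : PySem.List.slice parts (some 2) (some 3) = (parts.drop 2).take 1 := by
    have := PySem.List.slice_natCast (xs := parts) (a := 2) (b := 3)
    norm_num at this; exact this
  have hs2 : PySem.List.slice parts (some (-1)) none = parts.drop (parts.length - 1) :=
    PySem.List.slice_from_neg_one parts
  rw [hs1, hs2]
  by_cases h3 : 3 ≤ parts.length
  · have h2 : 2 < parts.length := by omega
    have hd : (parts.drop 2).take 1 = [parts[2]] := by
      rw [← List.getElem_cons_drop h2]
      rfl
    have hne1 : ([parts[2]] : List String) ≠ [] := by simp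
    rw [if_pos h3, hd, if_pos hne1, PySem.List.pyGetD_zero_cons]
    exact_mod_cast PySem.List.pyGetD_ofNat parts 2 "" h2
  · by_cases hne : parts ≠ []
    · have hd : (parts.drop 2).take 1 = [] := by
        have : parts.drop 2 = [] := List.drop_eq_nil_of_le (by omega)
        simp [this]
      have hlast : parts.drop (parts.length - 1) = [parts.getLast hne] :=
        List.drop_length_sub_one hne
      rw [if_neg h3, if_pos hne, hd, if_neg (by simp), hlast, if_pos (by simp)]
      rw [PySem.List.pyGetD_neg_one parts "" hne, PySem.List.pyGetD_zero_cons]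
    · simp at hne
      subst hne
      simp

-- ===== VERDICT (by name: the statement is the Claim_ definition above) =====
theorem get_row_key_py_spec : Claim_equal_get_row_key_py := by
  intro row match_key _
  unfold Spec_get_row_key_py get_row_key_py get_row_key_py_alt
  by_cases hp : match_key = "plandisc"
  · subst hp
    simp only [String.reduceEq, if_false, if_true,
               pvPick_eq_chain, pvChain_singleton]
    rw [pvArea_eq]
  · by_cases h1 : match_key = "tbs"
    · subst h1
      simp only [String.reduceEq, if_true, ite_false]
      rw [pvPick_eq_chain]; rfl
    · by_cases h2 : match_key = "id"
      · subst h2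
        simp only [String.reduceEq, if_true, ite_false]
        rw [pvPick_eq_chain]; rfl
      · by_cases h3 : match_key = "entydigt_id"
        · subst h3
          simp only [String.reduceEq, if_true, ite_false]
          rw [pvPick_eq_chain]; rfl
        · simp only [if_neg h1, if_neg h2, if_neg h3, if_neg hp]
          rw [pvPick_eq_chain]; rfl
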